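-- pv_equiv track=rewrite | github.com/priyankasudhindra/HackerRank | Marc'sCakewalk.py | marcsCakewalk
-- ===== SOURCE A (Python) =====
-- def marcsCakewalk(calorie):
--     calorie = sorted(calorie, reverse=True)
--     total = 0
--     number_of_cupcakes = 0
--     for i in calorie:
--         total += i * pow(2, number_of_cupcakes)
--         number_of_cupcakes += 1
--     return total
-- ===== SOURCE B (Python) =====
-- def marcsCakewalk(calorie):
--     total = 0
--     for c in sorted(calorie):
--         total = total * 2 + c
--     return total
-- ===== Notes on version B (the rewrite author's own statement) =====
-- stated objective: faster
-- what changed: Sorts ascending and folds Horner-style (total = total*2 + c), so the power-of-two weights arise from repeated doubling instead of A's explicit counter with a fresh pow(2, k) big-int built every iteration.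
import Mathlib
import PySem

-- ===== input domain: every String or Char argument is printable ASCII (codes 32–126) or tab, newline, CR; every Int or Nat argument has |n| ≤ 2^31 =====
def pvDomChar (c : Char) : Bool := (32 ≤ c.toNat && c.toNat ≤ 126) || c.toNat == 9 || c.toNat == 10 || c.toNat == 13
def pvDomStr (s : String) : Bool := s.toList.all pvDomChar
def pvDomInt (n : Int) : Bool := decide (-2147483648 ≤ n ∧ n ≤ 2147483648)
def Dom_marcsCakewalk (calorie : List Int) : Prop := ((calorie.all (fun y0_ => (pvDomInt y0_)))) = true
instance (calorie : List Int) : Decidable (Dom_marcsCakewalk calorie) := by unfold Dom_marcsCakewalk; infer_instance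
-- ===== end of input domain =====

-- B sorts ascending and folds Horner-style (total = total*2 + c) instead of A's
-- descending sort with an explicit counter and pow(2, k); same result, more idiomatic.


-- ===== PORT A =====
-- sorted(calorie, reverse=True), then accumulate total += i * 2^number_of_cupcakes.
def marcsCakewalk (calorie : List Int) : Int :=
  let calorie' := PySem.List.sorted calorie (fun x => x) true
  (calorie'.foldl (fun (st : Int × Nat) i => (st.1 + i * (2 : Int) ^ st.2, st.2 + 1)) (0, 0)).1

-- ===== PORT B =====
-- sorted ascending, Horner fold: total = total*2 + c.
def marcsCakewalk_alt (calorie : List Int) : Int :=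
  (PySem.List.sorted calorie (fun x => x) false).foldl (fun total c => total * 2 + c) 0

-- ===== PRECONDITION & SPEC =====
def Spec_marcsCakewalk (calorie : List Int) (out : Int) : Prop := out = marcsCakewalk_alt calorie
instance (calorie : List Int) (out : Int) : Decidable (Spec_marcsCakewalk calorie out) := by unfold Spec_marcsCakewalk; infer_instance

-- ===== CLAIM (what is proved, stated in full; the proofs are below) =====
def Claim_equal_marcsCakewalk : Prop := ∀ (calorie : List Int), Dom_marcsCakewalk calorie → Spec_marcsCakewalk calorie (marcsCakewalk calorie)

-- ===== LEMMAS AND PROOFS =====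

-- canonical value: g d = Σ d[i] * 2^i
def pvG : List Int → Int
  | [] => 0
  | x :: t => x + 2 * pvG t

theorem pvA_fold (d : List Int) : ∀ (t : Int) (k : Nat),
    (d.foldl (fun (st : Int × Nat) i => (st.1 + i * (2 : Int) ^ st.2, st.2 + 1)) (t, k)).1
      = t + 2 ^ k * pvG d := by
  induction d with
  | nil => intro t k; simp [pvG]
  | cons x s ih =>
      intro t k
      simp only [List.foldl_cons, pvG, ih]
      ring

theorem pvB_fold (d : List Int) : ∀ (a : Int),
    d.reverse.foldl (fun total c => total * 2 + c) a = a * 2 ^ d.length + pvG d := by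
  induction d with
  | nil => intro a; simp [pvG]
  | cons x s ih =>
      intro a
      simp only [List.reverse_cons, List.foldl_append, List.foldl_cons, List.foldl_nil,
        ih, pvG, List.length_cons]
      ring

-- sorted descending (stable, identity key, Int values) is the reverse of sorted ascending
theorem pv_desc_eq_rev_asc (calorie : List Int) :
    PySem.List.sorted calorie (fun x => x) true
      = (PySem.List.sorted calorie (fun x => x) false).reverse := by
  apply List.Perm.eq_of_pairwise (le := fun a b : Int => b ≤ a)
  · exact fun a b _ _ h1 h2 => le_antisymm h2 h1
  · exact PySem.List.sorted_pairwise_rev ..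
  · simpa [List.pairwise_reverse] using
      PySem.List.sorted_pairwise calorie (fun x => x)
  · exact (PySem.List.sorted_perm ..).trans
      ((PySem.List.sorted_perm calorie (fun x => x) false).symm.trans
        (List.reverse_perm _).symm)

-- ===== VERDICT (by name: the statement is the Claim_ definition above) =====
theorem marcsCakewalk_spec : Claim_equal_marcsCakewalk := by
  intro calorie _
  unfold Spec_marcsCakewalk marcsCakewalk marcsCakewalk_alt
  rw [pv_desc_eq_rev_asc]
  have h := pvB_fold ((PySem.List.sorted calorie (fun x => x) false).reverse) 0
  rw [List.reverse_reverse] at h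
  rw [h, pvA_fold]
  simp
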